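-- pv_equiv track=rewrite | github.com/JoJeHuni/jehun-coding-test | 프로그래머스/0/120864. 숨어있는 숫자의 덧셈 （2）/숨어있는 숫자의 덧셈 （2）.py | solution
-- ===== SOURCE A (Python) =====
-- def solution(my_string):
--     answer = 0
--
--     for i in my_string:
--         if i.isalpha():
--             my_string = my_string.replace(i, ' ')
--     my_string = my_string.split()
--
--     for i in range(len(my_string)) :
--         answer += int(my_string[i])
--
--     return answer
-- ===== SOURCE B (Python) =====
-- def solution(my_string):
--     total = 0
--     buf = ""
--     for ch in my_string:
--         if ch.isalpha() or ch.isspace():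
--             if buf:
--                 total += int(buf)
--                 buf = ""
--         else:
--             buf += ch
--     if buf:
--         total += int(buf)
--     return total
-- ===== Notes on version B (the rewrite author's own statement) =====
-- stated objective: faster
-- what changed: A rewrites the whole string once per alphabetic character via str.replace, then splits and sums; B makes a single left-to-right pass with a running sum and a token buffer flushed at each letter/whitespace separator.
import Mathlib
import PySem

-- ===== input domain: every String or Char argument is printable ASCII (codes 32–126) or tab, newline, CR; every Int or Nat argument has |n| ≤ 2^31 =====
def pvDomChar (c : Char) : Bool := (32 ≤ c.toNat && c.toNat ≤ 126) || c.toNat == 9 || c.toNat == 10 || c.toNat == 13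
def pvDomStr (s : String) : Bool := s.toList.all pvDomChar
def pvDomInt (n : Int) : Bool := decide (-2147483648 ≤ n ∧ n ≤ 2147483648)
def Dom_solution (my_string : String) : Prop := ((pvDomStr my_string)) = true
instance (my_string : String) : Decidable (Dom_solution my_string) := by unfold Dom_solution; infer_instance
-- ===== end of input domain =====

-- B replaces A's per-letter whole-string str.replace passes + split by a single left-to-right
-- scan with a running sum and a token buffer (objective: faster).

-- ===== PORT A =====
def solution (my_string : String) : Int :=
  -- for i in my_string: if i.isalpha(): my_string = my_string.replace(i, ' ')
  let s := my_string.toList.foldl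
    (fun acc c => if PySem.Chars.isalpha c then PySem.Chars.replace acc [c] [' '] else acc)
    my_string.toList
  -- my_string = my_string.split()
  let toks := PySem.Chars.split₀ s
  -- for i in range(len(my_string)): answer += int(my_string[i])  (int() raising excluded by Pre_)
  (PySem.List.pyRange 0 (PySem.List.len toks)).foldl
    (fun answer i => answer + (PySem.Int.ofChars? (PySem.List.pyGetD toks i [])).getD 0) 0

-- ===== PORT B =====
def solution_alt (my_string : String) : Int :=
  let st := my_string.toList.foldl
    (fun (st : Int × List Char) ch =>
      if PySem.Chars.isalpha ch || PySem.Chars.isspace ch then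
        if st.2.isEmpty then st
        else (st.1 + (PySem.Int.ofChars? st.2).getD 0, [])
      else (st.1, st.2 ++ [ch]))
    ((0 : Int), ([] : List Char))
  if st.2.isEmpty then st.1 else st.1 + (PySem.Int.ofChars? st.2).getD 0

-- ===== PRECONDITION & SPEC =====
-- Pre_ excludes exactly the inputs where Python's int() raises ValueError (in both A and B):
-- some letter/whitespace-delimited token of the string is not a valid integer literal.
def Pre_solution (my_string : String) : Prop :=
  ∀ t ∈ PySem.Chars.split₀
      (my_string.toList.map (fun c => if PySem.Chars.isalpha c then ' ' else c)),
    (PySem.Int.ofChars? t).isSome = true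
instance (my_string : String) : Decidable (Pre_solution my_string) := by
  unfold Pre_solution; infer_instance
def pvWitness_solution : String := "a1b23 -4"
def Spec_solution (my_string : String) (out : Int) : Prop := out = solution_alt my_string
instance (my_string : String) (out : Int) : Decidable (Spec_solution my_string out) := by
  unfold Spec_solution; infer_instance

-- ===== CLAIM (what is proved, stated in full; the proofs are below) =====
def Claim_equal_solution : Prop := ∀ (my_string : String), Dom_solution my_string → Pre_solution my_string → Spec_solution my_string (solution my_string)

-- ===== LEMMAS AND PROOFS =====

-- the alpha→' ' substitution, the separator test, int() with default, and B's loop step/flush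
def pvRepl (c : Char) : Char := if PySem.Chars.isalpha c then ' ' else c
def pvSep (c : Char) : Bool := PySem.Chars.isalpha c || PySem.Chars.isspace c
def pvVal (t : List Char) : Int := (PySem.Int.ofChars? t).getD 0
def pvStep (st : Int × List Char) (ch : Char) : Int × List Char :=
  if PySem.Chars.isalpha ch || PySem.Chars.isspace ch then
    if st.2.isEmpty then st
    else (st.1 + (PySem.Int.ofChars? st.2).getD 0, [])
  else (st.1, st.2 ++ [ch])
def pvFlush (st : Int × List Char) : Int :=
  if st.2.isEmpty then st.1 else st.1 + (PySem.Int.ofChars? st.2).getD 0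

-- s.replace(c, ' ') for a single character c is a map
lemma pv_replace_go_single (c : Char) (l : List Char) :
    ∀ (fuel : Nat) (acc : List Char), l.length ≤ fuel →
    PySem.Chars.replace.go [c] [' '] fuel l acc
      = acc.reverse ++ l.map (fun x => if x = c then ' ' else x) := by
  induction l with
  | nil =>
      intro fuel acc _
      cases fuel <;> simp [PySem.Chars.replace.go]
  | cons x t ih =>
      intro fuel acc hlen
      cases fuel with
      | zero => simp at hlen
      | succ n =>
          simp only [PySem.Chars.replace.go]
          by_cases hx : x = c
          · subst hx
            simp [List.isPrefixOf, ih n (' ' :: acc) (by simpa using hlen)]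
          · have : List.isPrefixOf [c] (x :: t) = false := by
              simp [List.isPrefixOf]; exact fun h => (hx h.symm).elim
            simp [this, hx, ih n (x :: acc) (by simpa using hlen)]

lemma pv_replace_single (c : Char) (s : List Char) :
    PySem.Chars.replace s [c] [' '] = s.map (fun x => if x = c then ' ' else x) := by
  simp [PySem.Chars.replace, pv_replace_go_single c s s.length [] le_rfl]

-- A's replace loop replaces exactly the alphabetic characters occurring in l
lemma pv_fold_replace (l : List Char) : ∀ (s : List Char),
    l.foldl (fun acc c => if PySem.Chars.isalpha c then PySem.Chars.replace acc [c] [' '] else acc) s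
      = s.map (fun x => if PySem.Chars.isalpha x = true ∧ x ∈ l then ' ' else x) := by
  induction l with
  | nil => intro s; simp
  | cons c rest ih =>
      intro s
      simp only [List.foldl_cons]
      by_cases hc : PySem.Chars.isalpha c = true
      · rw [if_pos hc, pv_replace_single, ih, List.map_map]
        apply List.map_congr_left
        intro x _
        by_cases hx : x = c
        · subst hx; simp [hc]
        · simp [Function.comp, hx, List.mem_cons]
      · rw [if_neg hc, ih]
        apply List.map_congr_left
        intro x _
        by_cases hx : x = c
        · subst hx; simp [hc]
        · simp [List.mem_cons, hx]

lemma pv_fold_replace_self (s : List Char) :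
    s.foldl (fun acc c => if PySem.Chars.isalpha c then PySem.Chars.replace acc [c] [' '] else acc) s
      = s.map pvRepl := by
  rw [pv_fold_replace]
  apply List.map_congr_left
  intro x hx
  by_cases h : PySem.Chars.isalpha x = true <;> simp [pvRepl, h, hx]

-- structure of str.split(): accumulator, leading separator, and token-prefix laws
lemma pv_go_acc (s : List Char) : ∀ (cur : List Char) (acc : List (List Char)),
    PySem.Chars.split₀.go s cur acc = acc.reverse ++ PySem.Chars.split₀.go s cur [] := by
  induction s with
  | nil =>
      intro cur acc
      by_cases h : cur.isEmpty <;> simp [PySem.Chars.split₀.go, h]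
  | cons c rest ih =>
      intro cur acc
      simp only [PySem.Chars.split₀.go]
      by_cases hsp : PySem.Chars.isspace c = true
      · by_cases hcur : cur.isEmpty = true
        · rw [if_pos hsp, if_pos hsp, if_pos hcur, if_pos hcur]; exact ih [] acc
        · rw [if_pos hsp, if_pos hsp, if_neg hcur, if_neg hcur,
              ih [] (cur.reverse :: acc), ih [] [cur.reverse]]
          simp
      · rw [if_neg hsp, if_neg hsp]; exact ih (c :: cur) acc

lemma pv_go_token (buf : List Char) (h : ∀ c ∈ buf, PySem.Chars.isspace c = false) :
    ∀ (s cur : List Char) (acc : List (List Char)),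
    PySem.Chars.split₀.go (buf ++ s) cur acc = PySem.Chars.split₀.go s (buf.reverse ++ cur) acc := by
  induction buf with
  | nil => intro s cur acc; simp
  | cons b t ih =>
      intro s cur acc
      have hb : PySem.Chars.isspace b = false := h b (by simp)
      simp only [List.cons_append, PySem.Chars.split₀.go]
      rw [if_neg (by simp [hb])]
      rw [ih (fun c hc => h c (by simp [hc])) s (b :: cur) acc]
      simp

lemma pv_split₀_space_cons (c : Char) (s : List Char) (h : PySem.Chars.isspace c = true) :
    PySem.Chars.split₀ (c :: s) = PySem.Chars.split₀ s := by
  simp only [PySem.Chars.split₀, PySem.Chars.split₀.go]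
  rw [if_pos h, if_pos (by rfl)]

lemma pv_split₀_token_nil (buf : List Char) (hne : buf ≠ [])
    (h : ∀ c ∈ buf, PySem.Chars.isspace c = false) :
    PySem.Chars.split₀ buf = [buf] := by
  have := pv_go_token buf h [] [] []
  simp only [List.append_nil] at this
  simp only [PySem.Chars.split₀, this, PySem.Chars.split₀.go]
  simp [hne]

lemma pv_split₀_token_cons (buf : List Char) (c : Char) (s : List Char) (hne : buf ≠ [])
    (h : ∀ x ∈ buf, PySem.Chars.isspace x = false) (hc : PySem.Chars.isspace c = true) :
    PySem.Chars.split₀ (buf ++ c :: s) = buf :: PySem.Chars.split₀ s := by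
  rw [PySem.Chars.split₀, pv_go_token buf h (c :: s) [] []]
  simp only [PySem.Chars.split₀.go, List.append_nil]
  rw [if_pos hc, if_neg (by simp [hne]), pv_go_acc]
  simp [PySem.Chars.split₀]

-- pvRepl sends separators to whitespace and fixes everything else
lemma pv_sep_repl (c : Char) (h : pvSep c = true) : PySem.Chars.isspace (pvRepl c) = true := by
  unfold pvSep at h
  unfold pvRepl
  by_cases ha : PySem.Chars.isalpha c = true
  · simp [ha]; decide
  · simp [ha] at h ⊢; exact h

lemma pv_nonsep (c : Char) (h : pvSep c = false) :
    pvRepl c = c ∧ PySem.Chars.isspace c = false := by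
  unfold pvSep at h
  simp only [Bool.or_eq_false_iff] at h
  exact ⟨by simp [pvRepl, h.1], h.2⟩

lemma pv_map_repl_id (buf : List Char) (h : ∀ c ∈ buf, pvSep c = false) :
    buf.map pvRepl = buf :=
  (List.map_congr_left (fun x hx => (pv_nonsep x (h x hx)).1)).trans (List.map_id buf)

lemma pv_buf_nonspace (buf : List Char) (h : ∀ c ∈ buf, pvSep c = false) :
    ∀ c ∈ buf, PySem.Chars.isspace c = false := fun c hc => (pv_nonsep c (h c hc)).2

-- the invariant of B's scan: flushed state = sum over the tokens of buf ++ cs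
lemma pv_scan (cs : List Char) : ∀ (total : Int) (buf : List Char),
    (∀ c ∈ buf, pvSep c = false) →
    pvFlush (cs.foldl pvStep (total, buf))
      = total + ((PySem.Chars.split₀ ((buf ++ cs).map pvRepl)).map pvVal).sum := by
  induction cs with
  | nil =>
      intro total buf h
      simp only [List.foldl_nil, List.append_nil, pvFlush]
      rw [pv_map_repl_id buf h]
      by_cases hb : buf = []
      · subst hb
        rw [show PySem.Chars.split₀ ([] : List Char) = [] from rfl]
        simp
      · rw [pv_split₀_token_nil buf hb (pv_buf_nonspace buf h)]
        simp [hb, pvVal, List.isEmpty_iff]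
  | cons c rest ih =>
      intro total buf h
      simp only [List.foldl_cons]
      by_cases hc : (PySem.Chars.isalpha c || PySem.Chars.isspace c) = true
      · have hsp : PySem.Chars.isspace (pvRepl c) = true := pv_sep_repl c hc
        by_cases hb : buf = []
        · subst hb
          rw [show pvStep (total, []) c = (total, []) by simp [pvStep, hc]]
          rw [ih total [] (by simp)]
          simp only [List.nil_append, List.map_cons]
          rw [pv_split₀_space_cons _ _ hsp]
        · rw [show pvStep (total, buf) c = (total + (PySem.Int.ofChars? buf).getD 0, []) by
              simp [pvStep, hc, List.isEmpty_iff, hb]]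
          rw [ih (total + (PySem.Int.ofChars? buf).getD 0) [] (by simp)]
          simp only [List.nil_append, List.map_append, List.map_cons]
          rw [pv_split₀_token_cons (buf.map pvRepl) (pvRepl c) (rest.map pvRepl)
                (by simpa [pv_map_repl_id buf h] using hb)
                (by rw [pv_map_repl_id buf h]; exact pv_buf_nonspace buf h) hsp]
          rw [pv_map_repl_id buf h]
          simp only [List.map_cons, List.sum_cons, pvVal]
          ring
      · rw [show pvStep (total, buf) c = (total, buf ++ [c]) by simp [pvStep, hc]]
        rw [ih total (buf ++ [c]) (by
          intro x hx
          rcases List.mem_append.mp hx with hx | hx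
          · exact h x hx
          · simp at hx; subst hx; simpa [pvSep] using hc)]
        simp

-- both ports compute the sum of int() over the tokens of the letter-blanked string
lemma pv_A_eq (s : String) :
    solution s = ((PySem.Chars.split₀ (s.toList.map pvRepl)).map pvVal).sum := by
  show (PySem.List.pyRange 0 (PySem.List.len (PySem.Chars.split₀ _))).foldl _ 0 = _
  rw [pv_fold_replace_self]
  rw [PySem.List.foldl_pyRange_pyGetD (PySem.Chars.split₀ (s.toList.map pvRepl)) []
        (fun acc t => acc + (PySem.Int.ofChars? t).getD 0) 0 le_rfl]
  simp only [Int.toNat_zero, List.drop_zero]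
  rw [PySem.List.foldl_add]
  simp only [zero_add]; rfl

lemma pv_B_eq (s : String) :
    solution_alt s = ((PySem.Chars.split₀ (s.toList.map pvRepl)).map pvVal).sum := by
  have : solution_alt s = pvFlush (s.toList.foldl pvStep (0, [])) := rfl
  rw [this, pv_scan s.toList 0 [] (by simp)]
  simp

-- ===== VERDICT (by name: the statement is the Claim_ definition above) =====
theorem solution_spec : Claim_equal_solution := by
  intro s _ _
  unfold Spec_solution
  rw [pv_A_eq, pv_B_eq]
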